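-- pv_equiv track=rewrite | github.com/sebastiaanzaaijer/AdventOfCode2023 | day1/part2.py | find_first_digit
-- ===== SOURCE A (Python) =====
-- digit_map = {
--     '1' : 1,
--     '2' : 2,
--     '3' : 3,
--     '4' : 4,
--     '5' : 5,
--     '6' : 6,
--     '7' : 7,
--     '8' : 8,
--     '9' : 9,
--     'one' : 1,
--     'two' : 2,
--     'three' : 3,
--     'four' : 4,
--     'five' : 5,
--     'six' : 6,
--     'seven' : 7,
--     'eight' : 8,
--     'nine' : 9,
-- }
--
-- def find_first_digit(string:str):
--     lowest_position = len(string)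
--     first_digit = ""
--     for digit in digit_map:
--         position = string.find(digit)
--         if position == 0: return digit_map[digit] # return early if "digit" appears at the start
--         if position >=0 and position < lowest_position:
--             lowest_position = position
--             first_digit = digit
--     return digit_map[first_digit]
-- ===== SOURCE B (Python) =====
-- def find_first_digit(string: str):
--     # walk the string left to right; at each position return the digit char's value
--     # or the value of the spelled-out word starting there
--     s = string
--     while s:
--         c = s[0]
--         if '1' <= c <= '9':
--             return ord(c) - ord('0')
--         if s.startswith('one'):
--             return 1
--         if s.startswith('two'):
--             return 2
--         if s.startswith('three'):
--             return 3
--         if s.startswith('four'):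
--             return 4
--         if s.startswith('five'):
--             return 5
--         if s.startswith('six'):
--             return 6
--         if s.startswith('seven'):
--             return 7
--         if s.startswith('eight'):
--             return 8
--         if s.startswith('nine'):
--             return 9
--         s = s[1:]
--     raise ValueError("no digit in string")
-- ===== Notes on version B (the rewrite author's own statement) =====
-- stated objective: simpler
-- what changed: B drops the dict and the 18 full str.find scans with leftmost-min tracking, and instead walks the string once left to right, returning at the first position that holds a digit character (value by ord arithmetic) or starts a spelled-out word (explicit startswith chain).
-- outside the precondition, e.g. on find_first_digit(''): A raises KeyError, B raises ValueError; on find_first_digit('abc'): A raises KeyError, B raises ValueError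
import Mathlib
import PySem

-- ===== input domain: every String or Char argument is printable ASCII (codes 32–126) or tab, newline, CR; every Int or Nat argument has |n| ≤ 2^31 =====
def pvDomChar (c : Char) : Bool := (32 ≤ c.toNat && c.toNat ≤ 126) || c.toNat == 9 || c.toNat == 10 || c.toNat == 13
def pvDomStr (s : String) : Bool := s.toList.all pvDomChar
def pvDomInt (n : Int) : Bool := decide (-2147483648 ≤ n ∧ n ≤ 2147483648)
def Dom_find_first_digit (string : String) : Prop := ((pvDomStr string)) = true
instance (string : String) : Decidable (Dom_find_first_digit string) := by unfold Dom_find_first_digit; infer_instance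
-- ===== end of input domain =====

-- B replaces A's dict plus 18 full str.find scans with min-tracking by one left-to-right
-- character walk with a direct digit-char/word-prefix check per position (objective: simpler).

-- ===== PORT A =====
-- the module-level digit_map, as its items in insertion order (keys as List Char)
def digitPairs : List (List Char × Int) :=
  [(['1'], 1), (['2'], 2), (['3'], 3), (['4'], 4), (['5'], 5), (['6'], 6), (['7'], 7),
   (['8'], 8), (['9'], 9),
   (['o','n','e'], 1), (['t','w','o'], 2), (['t','h','r','e','e'], 3),
   (['f','o','u','r'], 4), (['f','i','v','e'], 5), (['s','i','x'], 6),
   (['s','e','v','e','n'], 7), (['e','i','g','h','t'], 8), (['n','i','n','e'], 9)]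

def digitMap : PySem.Dict (List Char) Int := PySem.Dict.mk digitPairs

-- the for-loop over digit_map (iterating its items: digit_map[digit] inside the loop is the
-- paired value v); the final digit_map[first_digit] is Dict.get?; where Python raises KeyError
-- (no digit in the string, excluded by Pre_) the port returns the Option default 0
def findGoA (t : List Char) : List (List Char × Int) → Int → List Char → Int
  | [], _, first => (digitMap.get? first).getD 0
  | (d, v) :: rest, lowest, first =>
      let position := PySem.Chars.find t d
      if position = 0 then v
      else if 0 ≤ position ∧ position < lowest then findGoA t rest position d
      else findGoA t rest lowest first

def find_first_digit (string : String) : Int :=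
  findGoA string.toList digitPairs (string.toList.length : Int) []

-- ===== PORT B =====
-- the chain of s.startswith(word) checks at the current position
def wordValue (u : List Char) : Option Int :=
  if PySem.Chars.startswith u ['o','n','e'] then some 1
  else if PySem.Chars.startswith u ['t','w','o'] then some 2
  else if PySem.Chars.startswith u ['t','h','r','e','e'] then some 3
  else if PySem.Chars.startswith u ['f','o','u','r'] then some 4
  else if PySem.Chars.startswith u ['f','i','v','e'] then some 5
  else if PySem.Chars.startswith u ['s','i','x'] then some 6
  else if PySem.Chars.startswith u ['s','e','v','e','n'] then some 7
  else if PySem.Chars.startswith u ['e','i','g','h','t'] then some 8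
  else if PySem.Chars.startswith u ['n','i','n','e'] then some 9
  else none

-- the while loop: s shrinks by one char per iteration ('s = s[1:]'); per position the
-- digit-char range test with ord arithmetic, then the word chain
def scanB : List Char → Option Int
  | [] => none
  | c :: r =>
      if '1' ≤ c ∧ c ≤ '9' then some ((c.toNat : Int) - 48)
      else
        match wordValue (c :: r) with
        | some v => some v
        | none => scanB r

-- where Source B raises ValueError (no digit, excluded by Pre_) the port returns the Option default 0
def find_first_digit_alt (string : String) : Int := (scanB string.toList).getD 0

-- ===== PRECONDITION & SPEC =====
-- Pre_ excludes strings containing neither a digit character nor a spelled-out digit: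
-- there A raises KeyError('') on the final lookup (and B raises ValueError).
def Pre_find_first_digit (string : String) : Prop :=
  ∃ p ∈ digitPairs, PySem.Chars.isIn p.1 string.toList = true
instance (string : String) : Decidable (Pre_find_first_digit string) := by
  unfold Pre_find_first_digit; infer_instance

def pvWitness_find_first_digit : String := "ab1cd"

def Spec_find_first_digit (string : String) (out : Int) : Prop := out = find_first_digit_alt string
instance (string : String) (out : Int) : Decidable (Spec_find_first_digit string out) := by
  unfold Spec_find_first_digit; infer_instance

-- ===== CLAIM (what is proved, stated in full; the proofs are below) =====
def Claim_equal_find_first_digit : Prop := ∀ (string : String), Dom_find_first_digit string → Pre_find_first_digit string → Spec_find_first_digit string (find_first_digit string)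

-- ===== LEMMAS AND PROOFS =====

-- proof-side reformulation of B's per-position check as one fold over digitPairs,
-- to relate both ports to the same "leftmost key occurrence" characterisation
def altInner (u : List Char) : List (List Char × Int) → Option Int
  | [] => none
  | (d, v) :: rest => if PySem.Chars.startswith u d then some v else altInner u rest

def altOuter : List Char → Option Int
  | [] => none
  | c :: r =>
      match altInner (c :: r) digitPairs with
      | some v => some v
      | none => altOuter r

-- B's per-position check agrees with scanning digitPairs in order at that position
theorem char_eq_of_toNat {c d : Char} (h : c.toNat = d.toNat) : c = d :=
  Char.ext (UInt32.toNat_inj.mp h)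

theorem step_eq (c : Char) (r : List Char) :
    (if '1' ≤ c ∧ c ≤ '9' then some ((c.toNat : Int) - 48) else wordValue (c :: r))
      = altInner (c :: r) digitPairs := by
  by_cases h : '1' ≤ c ∧ c ≤ '9'
  · obtain ⟨h1, h2⟩ := h
    have hb1 : 49 ≤ c.toNat := le_trans (by decide) (UInt32.le_iff_toNat_le.mp (Char.le_def.mp h1))
    have hb2 : c.toNat ≤ 57 := le_trans (UInt32.le_iff_toNat_le.mp (Char.le_def.mp h2)) (by decide)
    have hcases : c.toNat = 49 ∨ c.toNat = 50 ∨ c.toNat = 51 ∨ c.toNat = 52 ∨ c.toNat = 53 ∨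
        c.toNat = 54 ∨ c.toNat = 55 ∨ c.toNat = 56 ∨ c.toNat = 57 := by omega
    rcases hcases with hc | hc | hc | hc | hc | hc | hc | hc | hc
    · have hce := char_eq_of_toNat (d := '1') (hc.trans (by decide)); subst hce
      simp [altInner, digitPairs, PySem.Chars.startswith, List.isPrefixOf]
    
    · have hce := char_eq_of_toNat (d := '2') (hc.trans (by decide)); subst hce
      simp [altInner, digitPairs, PySem.Chars.startswith, List.isPrefixOf]
    
    · have hce := char_eq_of_toNat (d := '3') (hc.trans (by decide)); subst hce
      simp [altInner, digitPairs, PySem.Chars.startswith, List.isPrefixOf]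
    
    · have hce := char_eq_of_toNat (d := '4') (hc.trans (by decide)); subst hce
      simp [altInner, digitPairs, PySem.Chars.startswith, List.isPrefixOf]
    
    · have hce := char_eq_of_toNat (d := '5') (hc.trans (by decide)); subst hce
      simp [altInner, digitPairs, PySem.Chars.startswith, List.isPrefixOf]
    
    · have hce := char_eq_of_toNat (d := '6') (hc.trans (by decide)); subst hce
      simp [altInner, digitPairs, PySem.Chars.startswith, List.isPrefixOf]
    
    · have hce := char_eq_of_toNat (d := '7') (hc.trans (by decide)); subst hce
      simp [altInner, digitPairs, PySem.Chars.startswith, List.isPrefixOf]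
    
    · have hce := char_eq_of_toNat (d := '8') (hc.trans (by decide)); subst hce
      simp [altInner, digitPairs, PySem.Chars.startswith, List.isPrefixOf]
    
    · have hce := char_eq_of_toNat (d := '9') (hc.trans (by decide)); subst hce
      simp [altInner, digitPairs, PySem.Chars.startswith, List.isPrefixOf]
  · have hne : ∀ d : Char, ('1' ≤ d ∧ d ≤ '9') → (d == c) = false := by
      intro d hd
      exact beq_eq_false_iff_ne.mpr (fun hc => h (hc ▸ hd))
    have h1 := hne '1' (by decide)
    have h2 := hne '2' (by decide)
    have h3 := hne '3' (by decide)
    have h4 := hne '4' (by decide)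
    have h5 := hne '5' (by decide)
    have h6 := hne '6' (by decide)
    have h7 := hne '7' (by decide)
    have h8 := hne '8' (by decide)
    have h9 := hne '9' (by decide)
    simp only [altInner, digitPairs, wordValue, PySem.Chars.startswith, List.isPrefixOf,
      h1, h2, h3, h4, h5, h6, h7, h8, h9, if_neg h, Bool.false_and, Bool.false_eq_true,
      if_false]
    rfl

theorem scanB_eq_altOuter : ∀ t : List Char, scanB t = altOuter t := by
  intro t
  induction t with
  | nil => rfl
  | cons c r ih =>
      have hs := step_eq c r
      by_cases h : '1' ≤ c ∧ c ≤ '9'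
      · rw [if_pos h] at hs
        simp [scanB, altOuter, h, ← hs]
      · rw [if_neg h] at hs
        simp only [scanB, altOuter, if_neg h, ← hs]
        cases hw : wordValue (c :: r) <;> simp [ih]

-- no digit_map key is a proper prefix of another (concrete finite check)
theorem pairs_prefix_eq : ∀ p ∈ digitPairs, ∀ q ∈ digitPairs, p.1 <+: q.1 → p = q := by decide

theorem pairs_ne_nil : ∀ p ∈ digitPairs, p.1 ≠ [] := by decide

theorem pairs_keys_nodup : (digitPairs.map Prod.fst).Nodup := by decide

-- at most one digit_map key can start at a given suffix
theorem uniq_at (u : List Char) {p q : List Char × Int} (hp : p ∈ digitPairs)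
    (hq : q ∈ digitPairs) (h1 : p.1 <+: u) (h2 : q.1 <+: u) : p = q := by
  rcases List.prefix_or_prefix_of_prefix h1 h2 with h | h
  · exact pairs_prefix_eq _ hp _ hq h
  · exact (pairs_prefix_eq _ hq _ hp h).symm

theorem altInner_none_iff (u : List Char) (L : List (List Char × Int)) :
    altInner u L = none ↔ ∀ p ∈ L, ¬ p.1 <+: u := by
  induction L with
  | nil => simp [altInner]
  | cons hd tl ih =>
      obtain ⟨d, v⟩ := hd
      by_cases h : PySem.Chars.startswith u d = true
      · simp [altInner, h, (PySem.Chars.startswith_iff u d).1 h]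
      · have hd : ¬ d <+: u := fun hc => h ((PySem.Chars.startswith_iff u d).2 hc)
        simp [altInner, h, ih, hd]

theorem altInner_some_aux (u : List Char) (p : List Char × Int) :
    ∀ L : List (List Char × Int), p ∈ L → p.1 <+: u →
    (∀ q ∈ L, q.1 <+: u → q = p) → altInner u L = some p.2 := by
  intro L
  induction L with
  | nil => intro h; cases h
  | cons hd tl ih =>
      intro hp hpre huniq
      obtain ⟨d, v⟩ := hd
      by_cases h : PySem.Chars.startswith u d = true
      · have : (d, v) = p := huniq _ List.mem_cons_self ((PySem.Chars.startswith_iff u d).1 h)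
        rw [← this]; simp [altInner, h]
      · have hptl : p ∈ tl := by
          rcases List.mem_cons.1 hp with heq | htl
          · subst heq; exact absurd ((PySem.Chars.startswith_iff u d).2 hpre) h
          · exact htl
        simp only [altInner, h, Bool.false_eq_true, if_false]
        exact ih hptl hpre (fun q' hq => huniq q' (List.mem_cons_of_mem _ hq))

theorem altInner_some_of (u : List Char) {p : List Char × Int} (hp : p ∈ digitPairs)
    (hpre : p.1 <+: u) : altInner u digitPairs = some p.2 :=
  altInner_some_aux u p digitPairs hp hpre (fun _q hq h => uniq_at u hq hp h hpre)

theorem altOuter_eq_some (t : List Char) (j : Nat) (v : Int)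
    (hj : altInner (t.drop j) digitPairs = some v)
    (hmin : ∀ i < j, altInner (t.drop i) digitPairs = none) : altOuter t = some v := by
  induction t generalizing j with
  | nil =>
      rw [List.drop_nil] at hj
      have : altInner ([] : List Char) digitPairs = none := by decide
      simp [this] at hj
  | cons c r ih =>
      cases j with
      | zero =>
          rw [List.drop_zero] at hj
          simp [altOuter, hj]
      | succ j' =>
          have h0 : altInner (c :: r) digitPairs = none := by
            have := hmin 0 (Nat.succ_pos _)
            simpa using this
          have hr : altOuter r = some v := by
            apply ih j'
            · simpa using hj
            · intro i hi
              have := hmin (i + 1) (by omega)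
              simpa using this
          simp [altOuter, h0, hr]

theorem find_bounds_of_prefix_drop {t d : List Char} {i : Nat} (h : d <+: t.drop i) :
    0 ≤ PySem.Chars.find t d ∧ PySem.Chars.find t d ≤ (i : Int) := by
  have hin : PySem.Chars.isIn d t = true :=
    (PySem.Chars.exists_prefix_drop_iff_isIn d t).1 ⟨i, h⟩
  have h0 : 0 ≤ PySem.Chars.find t d :=
    (PySem.Chars.find_nonneg_iff t d).2 ((PySem.Chars.isIn_iff_infix d t).1 hin)
  have hs := PySem.Chars.find_spec h0
  refine ⟨h0, ?_⟩
  by_contra hlt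
  exact hs.2 i (by omega) h

theorem find_lt_len {t d : List Char} (hne : d ≠ []) (h0 : 0 ≤ PySem.Chars.find t d) :
    PySem.Chars.find t d < (t.length : Int) := by
  have hs := PySem.Chars.find_spec h0
  have hlt : (PySem.Chars.find t d).toNat < t.length := by
    by_contra hge
    have : t.drop (PySem.Chars.find t d).toNat = [] := List.drop_eq_nil_of_le (by omega)
    rw [this] at hs
    exact hne (List.prefix_nil.1 hs.1)
  omega

theorem goA_correct (t : List Char) :
    ∀ (rest pre : List (List Char × Int)) (lowest : Int) (first : List Char),
    digitPairs = pre ++ rest →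
    ((first = [] ∧ lowest = (t.length : Int) ∧ ∀ p ∈ pre, PySem.Chars.find t p.1 = -1) ∨
      (∃ v, (first, v) ∈ digitPairs ∧ PySem.Chars.find t first = lowest ∧ 0 < lowest ∧
        ∀ p ∈ pre, PySem.Chars.find t p.1 = -1 ∨ lowest ≤ PySem.Chars.find t p.1)) →
    (∃ p ∈ digitPairs, 0 ≤ PySem.Chars.find t p.1) →
    findGoA t rest lowest first = (altOuter t).getD 0 := by
  intro rest
  induction rest with
  | nil =>
      intro pre lowest first hsplit hinv hex
      rw [List.append_nil] at hsplit
      subst hsplit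
      rcases hinv with ⟨_, _, hall⟩ | ⟨v, hmem, hfind, hpos, hall⟩
      · obtain ⟨p, hp, h0⟩ := hex
        have := hall p hp
        omega
      · have h0 : 0 ≤ PySem.Chars.find t first := by omega
        have hs := PySem.Chars.find_spec h0
        have hout : altOuter t = some v := by
          apply altOuter_eq_some t lowest.toNat
          · have : lowest.toNat = (PySem.Chars.find t first).toNat := by omega
            rw [this]
            exact altInner_some_of _ hmem hs.1
          · intro i hi
            rw [altInner_none_iff]
            intro q hq hqpre
            have hb := find_bounds_of_prefix_drop hqpre
            rcases hall q hq with hm1 | hge <;> omega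
        have hnodup : digitMap.keys.Nodup := by
          have h' : digitMap.keys = digitPairs.map Prod.fst := rfl
          rw [h']; exact pairs_keys_nodup
        have hget : digitMap.get? first = some v :=
          PySem.Dict.get?_of_mem_items digitMap hmem hnodup
        simp [findGoA, hget, hout]
  | cons hd rest' ih =>
      intro pre lowest first hsplit hinv hex
      obtain ⟨d, v⟩ := hd
      have hd_mem : (d, v) ∈ digitPairs := by
        rw [hsplit]; exact List.mem_append_right _ List.mem_cons_self
      by_cases hz : PySem.Chars.find t d = 0
      · -- early return: d starts the string, so position 0 is the leftmost match
        have h0 : 0 ≤ PySem.Chars.find t d := by omega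
        have hs := PySem.Chars.find_spec h0
        have hpref : d <+: t := by
          have : (PySem.Chars.find t d).toNat = 0 := by omega
          rw [this, List.drop_zero] at hs
          exact hs.1
        have hout : altOuter t = some v := by
          apply altOuter_eq_some t 0
          · rw [List.drop_zero]
            exact altInner_some_of _ hd_mem hpref
          · intro i hi; omega
        simp [findGoA, hz, hout]
      · by_cases hlt : 0 ≤ PySem.Chars.find t d ∧ PySem.Chars.find t d < lowest
        · -- new minimum: update lowest/first
          have hstep : findGoA t ((d, v) :: rest') lowest first
              = findGoA t rest' (PySem.Chars.find t d) d := by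
            simp [findGoA, hz, hlt]
          rw [hstep]
          apply ih (pre ++ [(d, v)]) _ _ (by rw [hsplit, List.append_assoc]; rfl) _ hex
          refine Or.inr ⟨v, hd_mem, rfl, by omega, ?_⟩
          intro p hp
          rcases List.mem_append.1 hp with hpre' | hsingle
          · rcases hinv with ⟨_, hlen, hall⟩ | ⟨v0, _, _, _, hall⟩
            · exact Or.inl (hall p hpre')
            · rcases hall p hpre' with hm1 | hge <;> omega
          · rw [List.mem_singleton.1 hsingle]
            exact Or.inr le_rfl
        · -- no update: d absent or not closer
          have hstep : findGoA t ((d, v) :: rest') lowest first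
              = findGoA t rest' lowest first := by
            simp [findGoA, hz, hlt]
          rw [hstep]
          apply ih (pre ++ [(d, v)]) _ _ (by rw [hsplit, List.append_assoc]; rfl) _ hex
          have hm1 : -1 ≤ PySem.Chars.find t d := PySem.Chars.neg_one_le_find t d
          rcases hinv with ⟨hfirst, hlen, hall⟩ | ⟨v0, hmem, hfind, hpos, hall⟩
          · refine Or.inl ⟨hfirst, hlen, ?_⟩
            intro p hp
            rcases List.mem_append.1 hp with hpre' | hsingle
            · exact hall p hpre'
            · rw [List.mem_singleton.1 hsingle]
              show PySem.Chars.find t d = -1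
              by_cases h0 : 0 ≤ PySem.Chars.find t d
              · have hne : d ≠ [] := pairs_ne_nil _ hd_mem
                have := find_lt_len hne h0
                omega
              · omega
          · refine Or.inr ⟨v0, hmem, hfind, hpos, ?_⟩
            intro p hp
            rcases List.mem_append.1 hp with hpre' | hsingle
            · exact hall p hpre'
            · rw [List.mem_singleton.1 hsingle]
              show PySem.Chars.find t d = -1 ∨ lowest ≤ PySem.Chars.find t d
              omega

-- ===== VERDICT (by name: the statement is the Claim_ definition above) =====
theorem find_first_digit_spec : Claim_equal_find_first_digit := by
  intro s _ hpre
  unfold Spec_find_first_digit find_first_digit find_first_digit_alt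
  rw [scanB_eq_altOuter]
  obtain ⟨p, hp, hin⟩ := hpre
  have hex : ∃ q ∈ digitPairs, 0 ≤ PySem.Chars.find s.toList q.1 :=
    ⟨p, hp, (PySem.Chars.find_nonneg_iff s.toList p.1).2 ((PySem.Chars.isIn_iff_infix p.1 s.toList).1 hin)⟩
  exact goA_correct s.toList digitPairs [] _ [] rfl (Or.inl ⟨rfl, rfl, by simp⟩) hex
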